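-- pv_equiv track=rewrite | github.com/justin-tuck/neet | Python/Binary Search/countNegatives.py | countNegativesInRow
-- ===== SOURCE A (Python) =====
-- def countNegativesInRow(row, index):
--     negatives = len(row) - index
--     for i in range(1, index + 1):
--
--         if (row[index - i] < 0):
--             negatives += 1
--         else:
--             break
--
--     return negatives
-- ===== SOURCE B (Python) =====
-- def countNegativesInRow(row, index):
--     # One forward pass: run is the length of the current streak of negative
--     # elements ending at i; after the loop it is the length of the all-negative
--     # tail of the scanned prefix, which together with the len(row) - index
--     # elements beyond the prefix is the answer.
--     run = 0
--     for i in range(index):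
--         run = run + 1 if row[i] < 0 else 0
--     return len(row) - index + run
-- ===== Notes on version B (the rewrite author's own statement) =====
-- stated objective: alternative
-- what changed: A scans backwards from index-1 with an early break at the first non-negative element; B scans the prefix forwards once with a resetting streak counter (run of consecutive negatives), with no break and no backward index arithmetic.
import Mathlib
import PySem

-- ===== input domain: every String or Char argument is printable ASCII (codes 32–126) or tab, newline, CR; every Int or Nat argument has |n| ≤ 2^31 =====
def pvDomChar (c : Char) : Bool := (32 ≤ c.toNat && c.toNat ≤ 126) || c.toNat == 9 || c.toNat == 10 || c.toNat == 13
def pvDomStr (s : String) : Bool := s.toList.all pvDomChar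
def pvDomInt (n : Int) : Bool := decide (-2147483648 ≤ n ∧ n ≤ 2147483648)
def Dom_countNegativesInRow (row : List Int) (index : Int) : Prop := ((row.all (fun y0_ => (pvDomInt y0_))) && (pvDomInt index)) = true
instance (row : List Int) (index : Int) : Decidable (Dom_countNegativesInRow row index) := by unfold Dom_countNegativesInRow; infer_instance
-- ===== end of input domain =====

-- B replaces A's backward break-scan by a single forward pass with a resetting
-- streak counter (alternative decomposition, same cost).


-- ===== PORT A =====
-- the for-loop with break: recursion over the range list; 'none' from pyGet? is an
-- IndexError (only reachable outside Pre_)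
def cnLoopA (row : List Int) (index : Int) : List Int → Int → Int
  | [], negatives => negatives
  | i :: rest, negatives =>
    match PySem.List.pyGet? row (index - i) with
    | some v => if v < 0 then cnLoopA row index rest (negatives + 1) else negatives
    | none => negatives

def countNegativesInRow (row : List Int) (index : Int) : Int :=
  cnLoopA row index (PySem.List.pyRange 1 (index + 1) 1) ((row.length : Int) - index)

-- ===== PORT B =====
-- row[i] as pyGetD: under Pre_ every accessed i is in range (Python B raises outside Pre_)
def countNegativesInRow_alt (row : List Int) (index : Int) : Int :=
  (row.length : Int) - index +
    (PySem.List.pyRange 0 index 1).foldl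
      (fun run i => if PySem.List.pyGetD row i 0 < 0 then run + 1 else 0) 0

-- ===== PRECONDITION & SPEC =====
-- Pre_ excludes only index > len(row), where both Pythons raise IndexError.
def Pre_countNegativesInRow (row : List Int) (index : Int) : Prop :=
  index ≤ (row.length : Int)
instance (row : List Int) (index : Int) : Decidable (Pre_countNegativesInRow row index) := by
  unfold Pre_countNegativesInRow; infer_instance

def pvWitness_countNegativesInRow : List Int × Int := ([3, 1, -1, -2], 3)

def Spec_countNegativesInRow (row : List Int) (index : Int) (out : Int) : Prop := out = countNegativesInRow_alt row index
instance (row : List Int) (index : Int) (out : Int) : Decidable (Spec_countNegativesInRow row index out) := by unfold Spec_countNegativesInRow; infer_instance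

-- ===== CLAIM (what is proved, stated in full; the proofs are below) =====
def Claim_equal_countNegativesInRow : Prop := ∀ (row : List Int) (index : Int), Dom_countNegativesInRow row index → Pre_countNegativesInRow row index → Spec_countNegativesInRow row index (countNegativesInRow row index)

-- ===== LEMMAS AND PROOFS =====

-- length of the maximal all-negative suffix of p (what both programs count)
def kneg (p : List Int) : Nat := (p.reverse.takeWhile (fun v => decide (v < 0))).length

lemma kneg_append_nonneg (q : List Int) (v : Int) (hv : 0 ≤ v) :
    kneg (q ++ [v]) = 0 := by
  simp [kneg, show ¬ v < 0 from by omega]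

lemma kneg_append_neg (q : List Int) (v : Int) (hv : v < 0) :
    kneg (q ++ [v]) = kneg q + 1 := by
  simp [kneg, hv]

lemma take_succ_of_lt (row : List Int) (t : Nat) (ht : t < row.length) :
    row.take (t + 1) = row.take t ++ [row[t]] := by
  rw [List.take_add_one]
  simp [List.getElem?_eq_getElem ht]

-- A's loop, scanning positions index-a, index-a-1, …, 0, computes acc + kneg of the
-- first t = index-a+1 elements
lemma cnLoopA_eq (row : List Int) (t : Nat) :
    ∀ (index a acc : Int), index - a + 1 = (t : Int) → t ≤ row.length →
      cnLoopA row index (PySem.List.pyRange a (index + 1) 1) acc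
        = acc + (kneg (row.take t) : Int) := by
  induction t with
  | zero =>
    intro index a acc h ht
    rw [PySem.List.pyRange_one_eq_nil (by omega)]
    simp [cnLoopA, kneg]
  | succ t ih =>
    intro index a acc h ht
    rw [PySem.List.pyRange_one_cons (by omega)]
    have hidx : index - a = (t : Int) := by omega
    have htlt : t < row.length := by omega
    have hget : PySem.List.pyGet? row (index - a) = some row[t] := by
      rw [hidx, PySem.List.pyGet?_natCast]
      simp [List.getElem?_eq_getElem htlt]
    simp only [cnLoopA, hget]
    by_cases hv : row[t] < 0
    · simp only [if_pos hv]
      rw [ih index (a + 1) (acc + 1) (by omega) (by omega),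
        take_succ_of_lt row t htlt, kneg_append_neg _ _ hv]
      push_cast; ring
    · simp only [if_neg hv]
      rw [take_succ_of_lt row t htlt, kneg_append_nonneg _ _ (by omega)]
      simp

-- B's forward streak fold over positions 0..t-1 computes kneg of the first t elements
lemma foldB_eq (row : List Int) (t : Nat) (ht : t ≤ row.length) :
    (PySem.List.pyRange 0 (t : Int) 1).foldl
        (fun run i => if PySem.List.pyGetD row i 0 < 0 then run + 1 else 0) 0
      = (kneg (row.take t) : Int) := by
  induction t with
  | zero =>
    rw [PySem.List.pyRange_one_eq_nil (by omega)]
    simp [kneg]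
  | succ t ih =>
    have htlt : t < row.length := by omega
    have hcast : ((t + 1 : Nat) : Int) = (t : Int) + 1 := by push_cast; ring
    rw [hcast, PySem.List.pyRange_one_succ_right (by omega), List.foldl_append,
      ih (by omega)]
    simp only [List.foldl_cons, List.foldl_nil, PySem.List.pyGetD_natCast]
    rw [List.getD_eq_getElem row 0 htlt, take_succ_of_lt row t htlt]
    by_cases hv : row[t] < 0
    · rw [if_pos hv, kneg_append_neg _ _ hv]; push_cast; ring
    · rw [if_neg hv, kneg_append_nonneg _ _ (by omega)]; simp

-- ===== VERDICT (by name: the statement is the Claim_ definition above) =====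
theorem countNegativesInRow_spec : Claim_equal_countNegativesInRow := by
  intro row index _ hle
  unfold Pre_countNegativesInRow at hle
  unfold Spec_countNegativesInRow countNegativesInRow countNegativesInRow_alt
  by_cases h0 : 0 ≤ index
  · have hidx : index = (index.toNat : Int) := by omega
    have htn : index.toNat ≤ row.length := by omega
    rw [cnLoopA_eq row index.toNat index 1 _ (by omega) htn]
    rw [hidx, foldB_eq row index.toNat htn]
    rw [Int.toNat_natCast]
  · -- index < 0: both loops are over an empty range
    rw [PySem.List.pyRange_one_eq_nil (a := 1) (by omega),
      PySem.List.pyRange_one_eq_nil (a := 0) (by omega)]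
    simp [cnLoopA]
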